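-- pv_equiv track=rewrite | github.com/dunz21/detectron2 | tools/draw_tools.py | calculate_direction
-- ===== SOURCE A (Python) =====
-- def calculate_direction(polygon_indices):
--     """
--     This function takes an array of 1s and 0s and returns a string representing
--     the point where the transition from 1 to 0 or 0 to 1 happens.
--     """
--     if(polygon_indices.__len__() < 2):
--         return None
--     for i in range(len(polygon_indices) - 1):
--         # Check if there is a transition from 1 to 0 or 0 to 1
--         if polygon_indices[i] != polygon_indices[i + 1]:
--             # Return '10' if the transition is from 1 to 0
--             if polygon_indices[i] == 1:
--                 return 'Entrance'
--             # Return '01' if the transition is from 0 to 1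
--             else:
--                 return 'Exit'
--     # Return 'No transition found' if there is no transition in the array
--     return None
-- ===== SOURCE B (Python) =====
-- def calculate_direction(polygon_indices):
--     if len(polygon_indices) < 2:
--         return None
--     distinct = set(polygon_indices)
--     if len(distinct) == 1:
--         return None
--     return 'Entrance' if polygon_indices[0] == 1 else 'Exit'
-- ===== Notes on version B (the rewrite author's own statement) =====
-- stated objective: simpler
-- what changed: Replaces A's adjacent-pair transition scan with building the set of distinct values once and testing its size, using the invariant that the first transition's left value equals the first element.
import Mathlib
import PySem

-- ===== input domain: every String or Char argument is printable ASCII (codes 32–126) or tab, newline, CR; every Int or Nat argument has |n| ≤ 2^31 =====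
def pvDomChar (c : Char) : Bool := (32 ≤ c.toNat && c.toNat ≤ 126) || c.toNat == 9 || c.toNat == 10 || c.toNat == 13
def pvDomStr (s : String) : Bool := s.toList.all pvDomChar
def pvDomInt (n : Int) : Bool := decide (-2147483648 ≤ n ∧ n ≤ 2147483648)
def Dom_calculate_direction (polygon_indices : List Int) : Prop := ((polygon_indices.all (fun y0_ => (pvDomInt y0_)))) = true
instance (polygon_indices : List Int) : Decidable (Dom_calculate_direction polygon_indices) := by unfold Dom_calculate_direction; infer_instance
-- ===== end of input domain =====

-- B builds the set of distinct values once and tests its size, instead of A's adjacent-pair transition scan (objective: simpler).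

-- ===== PORT A =====
-- A's index loop over i in range(len-1), comparing xs[i] with xs[i+1], as structural recursion on adjacent pairs
def calcDirLoopA : List Int → Option String
  | a :: b :: rest =>
      if a ≠ b then (if a = 1 then some "Entrance" else some "Exit")
      else calcDirLoopA (b :: rest)
  | _ => none

def calculate_direction (polygon_indices : List Int) : Option String :=
  if polygon_indices.length < 2 then none
  else calcDirLoopA polygon_indices

-- ===== PORT B =====
def calculate_direction_alt (polygon_indices : List Int) : Option String :=
  if polygon_indices.length < 2 then none
  else
    let distinct := PySem.Set.ofList polygon_indices
    if PySem.Set.len distinct == 1 then none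
    else if polygon_indices.headD 0 = 1 then some "Entrance" else some "Exit"

-- ===== PRECONDITION & SPEC =====
def Spec_calculate_direction (polygon_indices : List Int) (out : Option String) : Prop := out = calculate_direction_alt polygon_indices
instance (polygon_indices : List Int) (out : Option String) : Decidable (Spec_calculate_direction polygon_indices out) := by unfold Spec_calculate_direction; infer_instance

-- ===== CLAIM (what is proved, stated in full; the proofs are below) =====
def Claim_equal_calculate_direction : Prop := ∀ (polygon_indices : List Int), Dom_calculate_direction polygon_indices → Spec_calculate_direction polygon_indices (calculate_direction polygon_indices)

-- ===== LEMMAS AND PROOFS =====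
theorem calcDirLoopA_eq (rest : List Int) : ∀ (x : Int),
    calcDirLoopA (x :: rest) =
      if rest.all (fun y => y == x) then none
      else if x = 1 then some "Entrance" else some "Exit" := by
  induction rest with
  | nil => intro x; simp [calcDirLoopA]
  | cons b t ih =>
      intro x
      by_cases hxb : x = b
      · subst hxb
        simp [calcDirLoopA, ih x]
      · simp [calcDirLoopA, hxb, Ne.symm hxb]

theorem set_add_length_le (s : List Int) (y : Int) : s.length ≤ (PySem.Set.add s y).length := by
  unfold PySem.Set.add
  split <;> simp

theorem foldl_add_length_le (rest : List Int) : ∀ (s : List Int),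
    s.length ≤ (rest.foldl PySem.Set.add s).length := by
  induction rest with
  | nil => intro s; simp
  | cons b t ih =>
      intro s
      exact le_trans (set_add_length_le s b) (ih _)

-- the set of distinct values of x :: rest is the singleton {x} exactly when rest is uniformly x
theorem foldl_add_singleton_iff (rest : List Int) : ∀ (x : Int),
    (rest.foldl PySem.Set.add [x]).length = 1 ↔ rest.all (fun y => y == x) = true := by
  induction rest with
  | nil => intro x; simp
  | cons b t ih =>
      intro x
      by_cases hb : b = x
      · subst hb
        have hadd : PySem.Set.add [b] b = [b] := by simp [PySem.Set.add]
        simp only [List.foldl, hadd, List.all_cons, beq_self_eq_true, Bool.true_and]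
        exact ih b
      · have hadd : PySem.Set.add [x] b = [x, b] := by
          simp [PySem.Set.add, hb]
        have hle := foldl_add_length_le t [x, b]
        simp only [List.foldl, hadd, List.all_cons]
        constructor
        · intro h; simp at hle; omega
        · intro h
          simp only [Bool.and_eq_true, beq_iff_eq] at h
          exact absurd h.1 hb
      
-- ===== VERDICT (by name: the statement is the Claim_ definition above) =====
theorem calculate_direction_spec : Claim_equal_calculate_direction := by
  intro xs _
  unfold Spec_calculate_direction calculate_direction calculate_direction_alt
  match xs with
  | [] => simp
  | [x] => simp
  | x :: y :: rest =>
      simp only [List.length_cons]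
      rw [if_neg (by omega), if_neg (by omega)]
      rw [calcDirLoopA_eq]
      have hof : PySem.Set.ofList (x :: y :: rest) = (y :: rest).foldl PySem.Set.add [x] := by
        show (x :: y :: rest).foldl PySem.Set.add [] = _
        simp [List.foldl, PySem.Set.add]
      have hiff := foldl_add_singleton_iff (y :: rest) x
      by_cases h : (y :: rest).all (fun z => z == x) = true
      · rw [if_pos h]
        have hlen : ((y :: rest).foldl PySem.Set.add [x]).length = 1 := hiff.mpr h
        have hlen' : (rest.foldl PySem.Set.add (PySem.Set.add [x] y)).length = 1 := by
          simpa [List.foldl] using hlen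
        simp [hof, hlen']
      · rw [if_neg h]
        have hlen : ¬ ((y :: rest).foldl PySem.Set.add [x]).length = 1 := fun hh => h (hiff.mp hh)
        simp only [hof]
        simp
        intro hcon
        exact absurd (by simpa [List.foldl] using hcon) hlen
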